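-- pv_equiv track=rewrite | github.com/pmbstyle/Octopal | src/broodmind/workers/runtime.py | _extract_mcp_tool_identity
-- ===== SOURCE A (Python) =====
-- def _extract_mcp_tool_identity(tool_name: str, server_ids: list[str]) -> tuple[str | None, str | None]:
--     """Best-effort extraction of MCP server and remote tool names from generated tool names."""
--     if not tool_name.startswith("mcp_"):
--         return None, None
--     # Preferred path: longest matching normalized server id prefix.
--     normalized = sorted(((sid.replace("-", "_"), sid) for sid in server_ids), key=lambda x: len(x[0]), reverse=True)
--     for safe_id, original_id in normalized:
--         prefix = f"mcp_{safe_id}_"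
--         if tool_name.startswith(prefix):
--             remote_safe_name = tool_name[len(prefix):]
--             remote_tool_name = remote_safe_name.replace("_", "-")
--             return original_id, remote_tool_name
--
--     # Legacy fallback if server list is unavailable.
--     parts = tool_name.split("_")
--     if len(parts) < 3:
--         return None, None
--     return parts[1], "_".join(parts[2:])
-- ===== SOURCE B (Python) =====
-- def _extract_mcp_tool_identity(tool_name: str, server_ids: list[str]) -> tuple[str | None, str | None]:
--     """Single max-tracking pass over server_ids instead of sort-then-scan."""
--     if not tool_name.startswith("mcp_"):
--         return None, None
--     best = None  # (safe_id, original_id) with the longest matching prefix seen so far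
--     for sid in server_ids:
--         safe = sid.replace("-", "_")
--         if tool_name.startswith(f"mcp_{safe}_") and (best is None or len(best[0]) < len(safe)):
--             best = (safe, sid)
--     if best is not None:
--         safe, original_id = best
--         return original_id, tool_name[len(safe) + 5:].replace("_", "-")
--     # Legacy fallback if server list is unavailable.
--     parts = tool_name.split("_")
--     if len(parts) < 3:
--         return None, None
--     return parts[1], "_".join(parts[2:])
-- ===== Notes on version B (the rewrite author's own statement) =====
-- stated objective: simpler
-- what changed: Replaced A's sort-of-all-normalized-ids-by-descending-length followed by a first-match scan with a single pass over server_ids that keeps the best match under a strictly-greater prefix-length comparison (earliest wins on ties, matching the stable sort); the legacy split fallback is unchanged.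
import Mathlib
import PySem

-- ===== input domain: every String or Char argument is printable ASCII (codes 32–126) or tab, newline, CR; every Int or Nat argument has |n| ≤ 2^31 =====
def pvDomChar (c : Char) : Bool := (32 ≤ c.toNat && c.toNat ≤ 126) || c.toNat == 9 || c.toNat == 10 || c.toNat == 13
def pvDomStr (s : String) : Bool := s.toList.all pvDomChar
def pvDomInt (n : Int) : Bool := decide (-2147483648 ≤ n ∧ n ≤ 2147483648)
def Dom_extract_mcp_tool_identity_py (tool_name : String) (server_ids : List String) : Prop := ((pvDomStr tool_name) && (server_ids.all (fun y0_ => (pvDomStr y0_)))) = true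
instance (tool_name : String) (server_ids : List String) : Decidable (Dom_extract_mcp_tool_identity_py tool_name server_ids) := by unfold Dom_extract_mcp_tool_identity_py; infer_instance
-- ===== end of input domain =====

-- B replaces A's sort-then-scan with a single max-tracking pass over server_ids (simpler; no sort).
-- The legacy `split("_")` fallback is textually identical in both Pythons, so both ports share pvLegacyFallback.

-- f"mcp_{safe}_" (both Pythons build this very prefix string)
def pvMcpPrefix (safe : List Char) : List Char := "mcp_".toList ++ safe ++ ['_']

-- the legacy fallback block, identical in A and B: parts = tool.split("_"); < 3 → (None, None); else (parts[1], "_".join(parts[2:]))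
def pvLegacyFallback (tool : List Char) : Option String × Option String :=
  let parts := PySem.Chars.splitOn tool ['_']
  if parts.length < 3 then (none, none)
  else (some (String.ofList (PySem.List.pyGetD parts 1 [])),
        some (String.ofList (PySem.Chars.join ['_'] (PySem.List.slice parts (some 2) none))))

-- ===== PORT A =====
-- A's for-loop over the sorted (safe_id, original_id) pairs, returning at the first matching prefix
def pvScanSorted (tool : List Char) : List (List Char × String) → Option String × Option String
  | [] => pvLegacyFallback tool
  | (safe_id, original_id) :: rest =>
      if PySem.Chars.startswith tool (pvMcpPrefix safe_id) then
        (some original_id,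
         some (String.ofList (PySem.Chars.replace
           (PySem.List.slice tool (some ((pvMcpPrefix safe_id).length : Int)) none) ['_'] ['-'])))
      else pvScanSorted tool rest

def extract_mcp_tool_identity_py (tool_name : String) (server_ids : List String) : Option String × Option String :=
  if !PySem.Str.startswith tool_name "mcp_" then (none, none)
  else
    pvScanSorted tool_name.toList
      (PySem.List.sorted (server_ids.map (fun sid => (PySem.Chars.replace sid.toList ['-'] ['_'], sid)))
        (fun x => x.1.length) true)

-- ===== PORT B =====
def extract_mcp_tool_identity_py_alt (tool_name : String) (server_ids : List String) : Option String × Option String :=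
  if !PySem.Str.startswith tool_name "mcp_" then (none, none)
  else
    let best := server_ids.foldl (fun best sid =>
      let safe := PySem.Chars.replace sid.toList ['-'] ['_']
      if PySem.Chars.startswith tool_name.toList (pvMcpPrefix safe) &&
         (match best with | none => true | some b => decide (b.1.length < safe.length))
      then some (safe, sid) else best) none
    match best with
    | some (safe, original_id) =>
        (some original_id,
         some (String.ofList (PySem.Chars.replace
           (PySem.List.slice tool_name.toList (some ((safe.length : Int) + 5)) none) ['_'] ['-'])))
    | none => pvLegacyFallback tool_name.toList

-- ===== PRECONDITION & SPEC =====
def Spec_extract_mcp_tool_identity_py (tool_name : String) (server_ids : List String) (out : Option String × Option String) : Prop := out = extract_mcp_tool_identity_py_alt tool_name server_ids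
instance (tool_name : String) (server_ids : List String) (out : Option String × Option String) : Decidable (Spec_extract_mcp_tool_identity_py tool_name server_ids out) := by unfold Spec_extract_mcp_tool_identity_py; infer_instance

-- ===== CLAIM (what is proved, stated in full; the proofs are below) =====
def Claim_equal_extract_mcp_tool_identity_py : Prop := ∀ (tool_name : String) (server_ids : List String), Dom_extract_mcp_tool_identity_py tool_name server_ids → Spec_extract_mcp_tool_identity_py tool_name server_ids (extract_mcp_tool_identity_py tool_name server_ids)

-- ===== LEMMAS AND PROOFS =====

-- the match predicate and B's fold step, on the (safe_id, original_id) pairs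
def pvP (tool : List Char) (e : List Char × String) : Bool :=
  PySem.Chars.startswith tool (pvMcpPrefix e.1)

def pvStep (tool : List Char) (best : Option (List Char × String)) (e : List Char × String) :
    Option (List Char × String) :=
  if pvP tool e && (match best with | none => true | some b => decide (b.1.length < e.1.length))
  then some e else best

-- first match after a stable descending insertion = one strict-improvement step
lemma pv_find?_insertBy (tool : List Char) (x : List Char × String) (l : List (List Char × String))
    (hs : l.Pairwise (fun a b => b.1.length ≤ a.1.length)) :
    (PySem.List.insertBy (fun a b => decide (b.1.length < a.1.length)) x l).find? (pvP tool)
      = pvStep tool (l.find? (pvP tool)) x := by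
  induction l with
  | nil =>
      cases hpx : pvP tool x <;> simp [PySem.List.insertBy, pvStep, List.find?, hpx]
  | cons y ys ih =>
      have hy : ∀ b ∈ ys, b.1.length ≤ y.1.length := (List.pairwise_cons.mp hs).1
      have hys : ys.Pairwise (fun a b => b.1.length ≤ a.1.length) := (List.pairwise_cons.mp hs).2
      by_cases hxy : y.1.length < x.1.length
      · simp only [PySem.List.insertBy, hxy, decide_true, if_true]
        cases hpx : pvP tool x with
        | false => simp [List.find?_cons, hpx, pvStep]
        | true =>
            rw [List.find?_cons_of_pos hpx]
            cases hfy : (y :: ys).find? (pvP tool) with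
            | none => simp [pvStep, hpx]
            | some m =>
                have hm : m ∈ y :: ys := List.mem_of_find?_eq_some hfy
                have hml : m.1.length ≤ y.1.length := by
                  rcases List.mem_cons.mp hm with h | h
                  · simp [h]
                  · exact hy m h
                have hlt : m.1.length < x.1.length := lt_of_le_of_lt hml hxy
                simp [pvStep, hpx, hlt]
      · simp only [PySem.List.insertBy, hxy, decide_false]
        cases hpy : pvP tool y with
        | true =>
            simp [List.find?, hpy, pvStep, hxy]
        | false =>
            simp [List.find?, hpy, ih hys]

-- first match of A's stable descending sort = B's strict-improvement fold
lemma pv_find?_sorted (tool : List Char) (ys : List (List Char × String)) :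
    (PySem.List.sorted ys (fun x => x.1.length) true).find? (pvP tool)
      = ys.foldl (pvStep tool) none := by
  induction ys using List.reverseRecOn with
  | nil => simp [PySem.List.sorted]
  | append_singleton ys x ih =>
      rw [PySem.List.sorted_rev_eq_foldl_insertBy, List.foldl_append, List.foldl_cons, List.foldl_nil,
        ← PySem.List.sorted_rev_eq_foldl_insertBy]
      rw [pv_find?_insertBy tool x _ (PySem.List.sorted_pairwise_rev ys (fun x => x.1.length)), ih,
        List.foldl_append, List.foldl_cons, List.foldl_nil]

-- A's return-on-first-match loop as find?
lemma pv_scanSorted_eq (tool : List Char) (l : List (List Char × String)) :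
    pvScanSorted tool l
      = match l.find? (pvP tool) with
        | none => pvLegacyFallback tool
        | some e =>
            (some e.2,
             some (String.ofList (PySem.Chars.replace
               (PySem.List.slice tool (some ((pvMcpPrefix e.1).length : Int)) none) ['_'] ['-']))) := by
  induction l with
  | nil => simp [pvScanSorted, List.find?]
  | cons e rest ih =>
      obtain ⟨safe, orig⟩ := e
      cases hp : pvP tool (safe, orig) with
      | true =>
          have hp' : PySem.Chars.startswith tool (pvMcpPrefix safe) = true := hp
          simp [pvScanSorted, List.find?, hp, hp']
      | false =>
          have hp' : PySem.Chars.startswith tool (pvMcpPrefix safe) = false := hp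
          simp [pvScanSorted, List.find?, hp, hp', ih]

lemma pv_prefix_len (safe : List Char) :
    ((pvMcpPrefix safe).length : Int) = (safe.length : Int) + 5 := by
  simp [pvMcpPrefix]; omega

-- ===== VERDICT (by name: the statement is the Claim_ definition above) =====
theorem extract_mcp_tool_identity_py_spec : Claim_equal_extract_mcp_tool_identity_py := by
  intro tool_name server_ids _
  unfold Spec_extract_mcp_tool_identity_py extract_mcp_tool_identity_py extract_mcp_tool_identity_py_alt
  cases hstart : PySem.Str.startswith tool_name "mcp_" with
  | false => simp
  | true =>
      simp only [Bool.not_true, if_false, Bool.false_eq_true]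
      rw [pv_scanSorted_eq, pv_find?_sorted, List.foldl_map]
      have hfold :
          server_ids.foldl (fun acc sid =>
              pvStep tool_name.toList acc (PySem.Chars.replace sid.toList ['-'] ['_'], sid)) none
            = server_ids.foldl (fun best sid =>
                let safe := PySem.Chars.replace sid.toList ['-'] ['_']
                if PySem.Chars.startswith tool_name.toList (pvMcpPrefix safe) &&
                   (match best with | none => true | some b => decide (b.1.length < safe.length))
                then some (safe, sid) else best) none := rfl
      rw [hfold]
      cases hb : server_ids.foldl (fun best sid =>
          let safe := PySem.Chars.replace sid.toList ['-'] ['_']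
          if PySem.Chars.startswith tool_name.toList (pvMcpPrefix safe) &&
             (match best with | none => true | some b => decide (b.1.length < safe.length))
          then some (safe, sid) else best) none with
      | none => simp
      | some e => obtain ⟨safe, orig⟩ := e; simp [pv_prefix_len]
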